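-- pv_equiv track=rewrite | github.com/AI4Accountancy-ops/MSTR-Kennisbank | src/services/query_handler.py | _extract_relevant_chat_history
-- ===== SOURCE A (Python) =====
-- def _extract_relevant_chat_history(chat_history: list) -> dict:
--     """
--     Extracts up to three recent user-assistant message pairs and returns them as a dictionary.
--
--     Args:
--         chat_history (list): The list of chat messages.
--
--     Returns:
--         dict: A dictionary containing the recent chat pairs.
--     """
--     pairs = []
--     current_user_msg = None
--
--     # Go through the chat history in chronological order.
--     for msg in chat_history:
--         if msg["role"] == "user":
--             current_user_msg = msg["message"]
--         elif msg["role"] == "assistant" and current_user_msg is not None: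
--             pairs.append({"gebruiker": current_user_msg, "assistent": msg["message"]})
--             current_user_msg = None
--
--     # Take the last three pairs.
--     last_pairs = pairs[-3:]
--
--     return {"chat_history": last_pairs}
-- ===== SOURCE B (Python) =====
-- def _extract_relevant_chat_history(chat_history: list) -> dict:
--     """Backward scan with a pending-assistant slot; stops as soon as three pairs are found."""
--     last_pairs = []
--     pending = None
--     remaining = 3
--     for msg in reversed(chat_history):
--         if remaining == 0:
--             break
--         role = msg["role"]
--         if role == "assistant":
--             pending = msg["message"]
--         elif role == "user" and pending is not None:
--             last_pairs.append({"gebruiker": msg["message"], "assistent": pending})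
--             pending = None
--             remaining -= 1
--     last_pairs.reverse()
--     return {"chat_history": last_pairs}
-- ===== Notes on version B (the rewrite author's own statement) =====
-- stated objective: alternative
-- what changed: B scans the history backwards with a pending-assistant slot and stops as soon as three pairs are collected, instead of A's forward pass that builds every pair and slices off the last three.
-- outside the precondition, e.g. on _extract_relevant_chat_history([{'role': 'assistant'}]): A returns {'chat_history': []}, B raises KeyError
import Mathlib
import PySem

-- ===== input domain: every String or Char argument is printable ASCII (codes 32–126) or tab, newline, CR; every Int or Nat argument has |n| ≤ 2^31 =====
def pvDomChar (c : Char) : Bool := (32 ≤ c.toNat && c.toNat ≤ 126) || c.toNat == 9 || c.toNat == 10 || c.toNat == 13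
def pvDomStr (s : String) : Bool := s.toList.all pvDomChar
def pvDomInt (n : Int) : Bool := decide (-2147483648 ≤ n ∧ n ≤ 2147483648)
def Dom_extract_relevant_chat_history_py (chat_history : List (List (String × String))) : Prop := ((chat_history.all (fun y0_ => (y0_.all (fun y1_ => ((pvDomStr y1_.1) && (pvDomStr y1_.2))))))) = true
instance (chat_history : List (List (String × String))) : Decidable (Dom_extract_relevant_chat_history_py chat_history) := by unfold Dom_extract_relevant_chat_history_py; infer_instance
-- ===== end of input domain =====

-- B scans the chat history backwards with a pending-assistant slot and stops after three pairs,
-- instead of A's forward pass that builds all pairs and slices the last three (objective: alternative).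


-- ===== PORT A =====
-- msg["k"] is first-match lookup in the association list; under Pre_ the looked-up keys are
-- present, so '(List.lookup … ).getD ""' is exact where Python returns (none = KeyError, excluded by Pre_).
def pvAStep (st : List (List (String × String)) × Option String) (msg : List (String × String)) :
    List (List (String × String)) × Option String :=
  if (List.lookup "role" msg).getD "" == "user" then
    (st.1, some ((List.lookup "message" msg).getD ""))
  else if ((List.lookup "role" msg).getD "" == "assistant") && st.2.isSome then
    (st.1 ++ [[("gebruiker", st.2.getD ""), ("assistent", (List.lookup "message" msg).getD "")]], none)
  else st

def extract_relevant_chat_history_py (chat_history : List (List (String × String))) :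
    List (String × List (List (String × String))) :=
  let st := chat_history.foldl pvAStep ([], none)
  [("chat_history", PySem.List.slice st.1 (some (-3)) none)]

-- ===== PORT B =====
-- the reversed-iteration loop of Source B: 'remaining' is the break counter, 'pending' the assistant slot
def pvBLoop : List (List (String × String)) → Nat → Option String → List (List (String × String))
  | [], _, _ => []
  | msg :: rest, remaining, pending =>
    if remaining = 0 then []
    else
      let role := (List.lookup "role" msg).getD ""
      if role == "assistant" then
        pvBLoop rest remaining (some ((List.lookup "message" msg).getD ""))
      else if (role == "user") && pending.isSome then
        [("gebruiker", (List.lookup "message" msg).getD ""), ("assistent", pending.getD "")]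
          :: pvBLoop rest (remaining - 1) none
      else pvBLoop rest remaining pending

def extract_relevant_chat_history_py_alt (chat_history : List (List (String × String))) :
    List (String × List (List (String × String))) :=
  [("chat_history", (pvBLoop chat_history.reverse 3 none).reverse)]

-- ===== PRECONDITION & SPEC =====
-- Pre_ excludes inputs on which a Python KeyError is reachable: a message without a "role" key
-- (A always raises there), and a "user"/"assistant" message without a "message" key — on the
-- unpaired-assistant corner of the latter A happens to return while B raises, an artefact of
-- traversal direction, so those messages are excluded too.
def Pre_extract_relevant_chat_history_py (chat_history : List (List (String × String))) : Prop :=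
  ∀ msg ∈ chat_history, (List.lookup "role" msg).isSome ∧
    ((List.lookup "role" msg = some "user" ∨ List.lookup "role" msg = some "assistant") →
      (List.lookup "message" msg).isSome)

instance (chat_history : List (List (String × String))) : Decidable (Pre_extract_relevant_chat_history_py chat_history) := by
  unfold Pre_extract_relevant_chat_history_py; infer_instance

def pvWitness_extract_relevant_chat_history_py : (List (List (String × String))) :=
  [[("role", "user"), ("message", "hoi")], [("role", "assistant"), ("message", "hallo")]]

def Spec_extract_relevant_chat_history_py (chat_history : List (List (String × String))) (out : List (String × List (List (String × String)))) : Prop := out = extract_relevant_chat_history_py_alt chat_history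
instance (chat_history : List (List (String × String))) (out : List (String × List (List (String × String)))) : Decidable (Spec_extract_relevant_chat_history_py chat_history out) := by unfold Spec_extract_relevant_chat_history_py; infer_instance

-- ===== CLAIM (what is proved, stated in full; the proofs are below) =====
def Claim_equal_extract_relevant_chat_history_py : Prop := ∀ (chat_history : List (List (String × String))), Dom_extract_relevant_chat_history_py chat_history → Pre_extract_relevant_chat_history_py chat_history → Spec_extract_relevant_chat_history_py chat_history (extract_relevant_chat_history_py chat_history)

-- ===== LEMMAS AND PROOFS =====

-- the forward pairs of l, plus the extra pair formed when an assistant message 'pend' follows l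
-- while a user message is still pending
def pvP (l : List (List (String × String))) (pend : Option String) : List (List (String × String)) :=
  let st := l.foldl pvAStep ([], none)
  st.1 ++ (match st.2, pend with
    | some u, some a => [[("gebruiker", u), ("assistent", a)]]
    | _, _ => [])

lemma pvP_nil (pend : Option String) : pvP [] pend = [] := by
  cases pend <;> rfl

-- backward collection with budget k = the last k forward pairs, newest first
lemma pvBLoop_eq (r : List (List (String × String))) :
    ∀ (k : Nat) (pend : Option String),
      pvBLoop r k pend = ((pvP r.reverse pend).reverse).take k := by
  induction r with
  | nil => intro k pend; simp [pvBLoop, pvP_nil]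
  | cons m rest ih =>
    intro k pend
    cases k with
    | zero => simp [pvBLoop]
    | succ k' =>
      have hrev : (m :: rest).reverse = rest.reverse ++ [m] := by simp
      rw [hrev]
      by_cases hA : (List.lookup "role" m).getD "" = "assistant"
      · -- assistant: overwrite the pending slot; on the forward side it pairs with s.2 if any
        have hL : pvBLoop (m :: rest) (k' + 1) pend
            = pvBLoop rest (k' + 1) (some ((List.lookup "message" m).getD "")) := by
          simp [pvBLoop, hA]
        have hR : pvP (rest.reverse ++ [m]) pend
            = pvP rest.reverse (some ((List.lookup "message" m).getD "")) := by
          simp only [pvP, List.foldl_append, List.foldl_cons, List.foldl_nil]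
          generalize rest.reverse.foldl pvAStep ([], none) = s
          obtain ⟨p, c⟩ := s
          cases c <;> cases pend <;> simp [pvAStep, hA]
        rw [hL, hR, ih]
      · by_cases hU : (List.lookup "role" m).getD "" = "user"
        · cases pend with
          | none =>
            have hL : pvBLoop (m :: rest) (k' + 1) none = pvBLoop rest (k' + 1) none := by
              simp [pvBLoop, hU]
            have hR : pvP (rest.reverse ++ [m]) none = pvP rest.reverse none := by
              simp only [pvP, List.foldl_append, List.foldl_cons, List.foldl_nil]
              generalize rest.reverse.foldl pvAStep ([], none) = s
              obtain ⟨p, c⟩ := s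
              cases c <;> simp [pvAStep, hU]
            rw [hL, hR, ih]
          | some a =>
            have hL : pvBLoop (m :: rest) (k' + 1) (some a)
                = [("gebruiker", (List.lookup "message" m).getD ""), ("assistent", a)]
                    :: pvBLoop rest k' none := by
              simp [pvBLoop, hU]
            have hR : pvP (rest.reverse ++ [m]) (some a)
                = pvP rest.reverse none
                    ++ [[("gebruiker", (List.lookup "message" m).getD ""), ("assistent", a)]] := by
              simp only [pvP, List.foldl_append, List.foldl_cons, List.foldl_nil]
              generalize rest.reverse.foldl pvAStep ([], none) = s
              obtain ⟨p, c⟩ := s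
              cases c <;> simp [pvAStep, hU]
            rw [hL, hR, ih]
            simp
        · -- other role: both sides ignore the message
          have hL : pvBLoop (m :: rest) (k' + 1) pend = pvBLoop rest (k' + 1) pend := by
            simp [pvBLoop, hA, hU]
          have hR : pvP (rest.reverse ++ [m]) pend = pvP rest.reverse pend := by
            simp only [pvP, List.foldl_append, List.foldl_cons, List.foldl_nil]
            generalize rest.reverse.foldl pvAStep ([], none) = s
            obtain ⟨p, c⟩ := s
            cases c <;> cases pend <;> simp [pvAStep, hU, hA]
          rw [hL, hR, ih]

-- with no trailing assistant, pvP is just the forward pairs of A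
lemma pvP_none (l : List (List (String × String))) :
    pvP l none = (l.foldl pvAStep ([], none)).1 := by
  simp only [pvP]
  generalize l.foldl pvAStep ([], none) = s
  obtain ⟨p, c⟩ := s
  cases c <;> simp


-- ===== VERDICT (by name: the statement is the Claim_ definition above) =====
theorem extract_relevant_chat_history_py_spec : Claim_equal_extract_relevant_chat_history_py := by
  intro ch _ _
  unfold Spec_extract_relevant_chat_history_py
  simp only [extract_relevant_chat_history_py, extract_relevant_chat_history_py_alt]
  rw [pvBLoop_eq, List.reverse_reverse, pvP_none,
      PySem.List.slice_from_neg_ofNat _ 3 (by omega), List.take_reverse, List.reverse_reverse]
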